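-- pv_equiv track=rewrite | github.com/cirosantilli/project-euler-solutions | solvers/840.py | build_b
-- ===== SOURCE A (Python) =====
-- from typing import Dict, List, Tuple
--
-- def build_b(n: int, mod: int, D: List[int], size: int) -> List[int]:
--     """Compute b[k] = sum_{m|k} m * D(m)^{k/m} (mod mod) for k<=n."""
--     b = [0] * size
--     for m in range(1, n + 1):
--         wm = D[m] % mod
--         mm = m % mod
--         pwr = wm
--         j = m
--         while j <= n:
--             b[j] = (b[j] + mm * pwr) % mod
--             pwr = (pwr * wm) % mod
--             j += m
--     return b
-- ===== SOURCE B (Python) =====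
-- def _powmod(base, e, mod):
--     """Square-and-multiply: base**e % mod (Python % semantics)."""
--     r = 1 % mod
--     while e > 0:
--         if e % 2 == 1:
--             r = (r * base) % mod
--         base = (base * base) % mod
--         e //= 2
--     return r
--
--
-- def build_b(n, mod, D, size):
--     """Compute b[k] = sum_{m|k} m * D(m)^{k/m} (mod mod) for k<=n,
--     by enumerating the divisors of each k (trial division) and using
--     modular exponentiation, instead of sieving over multiples."""
--     b = [0] * size
--     for k in range(1, n + 1):
--         acc = 0
--         for m in range(1, k + 1):
--             if k % m == 0:
--                 acc = (acc + (m % mod) * _powmod(D[m] % mod, k // m, mod)) % mod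
--         b[k] = acc
--     return b
-- ===== Notes on version B (the rewrite author's own statement) =====
-- stated objective: alternative
-- what changed: Replaces the multiplicative sieve (outer loop over m, inner walk over multiples j of m with an incrementally maintained power) by a per-k divisor enumeration: for each k it trial-divides m=1..k and adds m*D[m]^(k//m) via square-and-multiply modular exponentiation.
import Mathlib
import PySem

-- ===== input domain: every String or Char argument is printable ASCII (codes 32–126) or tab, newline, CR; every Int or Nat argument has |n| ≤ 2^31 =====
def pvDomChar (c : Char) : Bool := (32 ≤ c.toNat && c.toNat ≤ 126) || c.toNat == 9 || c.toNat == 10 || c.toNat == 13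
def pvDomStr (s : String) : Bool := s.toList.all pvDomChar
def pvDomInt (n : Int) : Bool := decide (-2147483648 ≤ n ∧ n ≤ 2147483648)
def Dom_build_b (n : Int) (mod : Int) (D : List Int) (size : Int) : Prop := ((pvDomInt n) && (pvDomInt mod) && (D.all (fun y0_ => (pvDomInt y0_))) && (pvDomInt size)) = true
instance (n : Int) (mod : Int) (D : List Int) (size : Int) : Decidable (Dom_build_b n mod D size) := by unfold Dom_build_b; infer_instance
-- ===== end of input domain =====

-- B replaces A's multiplicative sieve over multiples by per-k divisor enumeration with
-- square-and-multiply modular exponentiation (objective: alternative algorithm, not faster).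

-- ===== PORT A =====
-- the inner 'while j <= n' loop of A (1 ≤ m guard only makes the recursion total; A's m is always ≥ 1)
def buildInnerA (n mod m wm mm : Int) (pwr j : Int) (b : List Int) : List Int :=
  if h : 1 ≤ m ∧ j ≤ n then
    buildInnerA n mod m wm mm (PySem.Int.mod (pwr * wm) mod) (j + m)
      (PySem.List.pySetD b j (PySem.Int.mod (PySem.List.pyGetD b j 0 + mm * pwr) mod))
  else b
termination_by (n + 1 - j).toNat
decreasing_by omega

def build_b (n : Int) (mod : Int) (D : List Int) (size : Int) : List Int :=
  (PySem.List.pyRange 1 (n + 1) 1).foldl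
    (fun b m =>
      let wm := PySem.Int.mod (PySem.List.pyGetD D m 0) mod
      let mm := PySem.Int.mod m mod
      buildInnerA n mod m wm mm wm m b)
    (List.replicate size.toNat 0)

-- ===== PORT B =====
-- B's helper _powmod: r = 1 % mod; while e > 0: …
def powmodLoop (mod : Int) (r base e : Int) : Int :=
  if h : 0 < e then
    powmodLoop mod (if PySem.Int.mod e 2 = 1 then PySem.Int.mod (r * base) mod else r)
      (PySem.Int.mod (base * base) mod) (PySem.Int.floordiv e 2)
  else r
termination_by e.toNat
decreasing_by
  rw [PySem.Int.floordiv_eq_ediv_of_pos (by omega : (0:Int) < 2)]; omega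

def powmodB (base e mod : Int) : Int := powmodLoop mod (PySem.Int.mod 1 mod) base e

def build_b_alt (n : Int) (mod : Int) (D : List Int) (size : Int) : List Int :=
  (PySem.List.pyRange 1 (n + 1) 1).foldl
    (fun b k =>
      PySem.List.pySetD b k
        ((PySem.List.pyRange 1 (k + 1) 1).foldl
          (fun acc m =>
            if PySem.Int.mod k m = 0 then
              PySem.Int.mod
                (acc + PySem.Int.mod m mod *
                  powmodB (PySem.Int.mod (PySem.List.pyGetD D m 0) mod) (PySem.Int.floordiv k m) mod)
                mod
            else acc)
          0))
    (List.replicate size.toNat 0)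

-- ===== PRECONDITION & SPEC =====
-- Pre_ excludes exactly the inputs where A raises: if n ≥ 1 then mod = 0 (ZeroDivisionError),
-- len(D) ≤ n (IndexError on D[m]) or size ≤ n (IndexError on b[j]); for n ≤ 0 A always returns.
def Pre_build_b (n : Int) (mod : Int) (D : List Int) (size : Int) : Prop :=
  1 ≤ n → (mod ≠ 0 ∧ n < (D.length : Int) ∧ n < size)
instance (n : Int) (mod : Int) (D : List Int) (size : Int) : Decidable (Pre_build_b n mod D size) := by unfold Pre_build_b; infer_instance
def pvWitness_build_b : Int × Int × List Int × Int := (3, 5, [0, 1, 2, 3], 4)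

def Spec_build_b (n : Int) (mod : Int) (D : List Int) (size : Int) (out : List Int) : Prop := out = build_b_alt n mod D size
instance (n : Int) (mod : Int) (D : List Int) (size : Int) (out : List Int) : Decidable (Spec_build_b n mod D size out) := by unfold Spec_build_b; infer_instance

-- ===== CLAIM (what is proved, stated in full; the proofs are below) =====
def Claim_equal_build_b : Prop := ∀ (n : Int) (mod : Int) (D : List Int) (size : Int), Dom_build_b n mod D size → Pre_build_b n mod D size → Spec_build_b n mod D size (build_b n mod D size)

-- ===== LEMMAS AND PROOFS =====

lemma pymod_modEq (P a : Int) : Int.ModEq P (PySem.Int.mod a P) a := by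
  have h := PySem.Int.floordiv_mul_add_mod a P
  have : P ∣ a - PySem.Int.mod a P := ⟨PySem.Int.floordiv a P, by linarith⟩
  exact (Int.modEq_iff_dvd.mpr this)

lemma pymod_zero (P : Int) : PySem.Int.mod 0 P = 0 := by
  exact (PySem.Int.mod_eq_zero_iff_dvd 0 P).mpr (dvd_zero P)

lemma pymod_congr (P a a' : Int) (hP : P ≠ 0) (h : Int.ModEq P a a') :
    PySem.Int.mod a P = PySem.Int.mod a' P := by
  have hd : P ∣ (PySem.Int.mod a P - PySem.Int.mod a' P) :=
    ((pymod_modEq P a).trans (h.trans (pymod_modEq P a').symm)).symm.dvd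
  rcases lt_or_gt_of_ne hP with hneg | hpos
  · have b1 := PySem.Int.mod_neg_bounds a hneg
    have b2 := PySem.Int.mod_neg_bounds a' hneg
    have := Int.eq_zero_of_abs_lt_dvd ((neg_dvd).mpr hd) (by rw [abs_lt]; omega)
    omega
  · have b1 := PySem.Int.mod_nonneg a hpos
    have c1 := PySem.Int.mod_lt a hpos
    have b2 := PySem.Int.mod_nonneg a' hpos
    have c2 := PySem.Int.mod_lt a' hpos
    have := Int.eq_zero_of_abs_lt_dvd hd (by rw [abs_lt]; omega)
    omega

lemma powmodLoop_modEq (P : Int) (hP : P ≠ 0) (e : Int) (he : 0 ≤ e) (r base : Int) :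
    Int.ModEq P (powmodLoop P r base e) (r * base ^ e.toNat) := by
  generalize hn : e.toNat = n
  induction n using Nat.strong_induction_on generalizing e r base with
  | _ n ih =>
    rw [powmodLoop]
    by_cases h0 : 0 < e
    · rw [dif_pos h0]
      have h2 : PySem.Int.floordiv e 2 = e / 2 := PySem.Int.floordiv_eq_ediv_of_pos (by omega)
      have hm2 : PySem.Int.mod e 2 = e % 2 := PySem.Int.mod_eq_emod_of_pos (by omega)
      have he' : (0:Int) ≤ e / 2 := by omega
      have hn' : (e / 2).toNat = n / 2 := by omega
      have hlt : n / 2 < n := by omega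
      have step := ih (n / 2) hlt (e / 2) he'
        (if PySem.Int.mod e 2 = 1 then PySem.Int.mod (r * base) P else r)
        (PySem.Int.mod (base * base) P) hn'
      rw [h2]
      refine step.trans ?_
      have hb : Int.ModEq P ((PySem.Int.mod (base * base) P) ^ (n / 2)) ((base * base) ^ (n / 2)) :=
        (pymod_modEq P (base * base)).pow _
      by_cases hodd : PySem.Int.mod e 2 = 1
      · rw [if_pos hodd]
        refine (((pymod_modEq P (r * base)).mul hb)).trans ?_
        obtain ⟨k, hk⟩ : ∃ k, n = 2 * k + 1 := ⟨n / 2, by omega⟩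
        rw [show n / 2 = k by omega, hk]
        have : r * base * (base * base) ^ k = r * base ^ (2 * k + 1) := by
          rw [two_mul, pow_add, pow_add, pow_one]; ring
        rw [this]
      · rw [if_neg hodd]
        refine ((Int.ModEq.refl r).mul hb).trans ?_
        obtain ⟨k, hk⟩ : ∃ k, n = 2 * k := ⟨n / 2, by omega⟩
        rw [show n / 2 = k by omega, hk]
        have : r * (base * base) ^ k = r * base ^ (2 * k) := by
          rw [two_mul, pow_add]; ring
        rw [this]
    · rw [dif_neg h0]
      have : n = 0 := by omega
      simp [this]

def tvalF (D : List Int) (i m : ℕ) : Int := (m : Int) * (D.getD m 0) ^ (i / m)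

def SF (D : List Int) (M i : ℕ) : Int :=
  ((List.range (M + 1)).map (fun m => if m ∣ i ∧ 1 ≤ m then tvalF D i m else 0)).sum

lemma SF_zero (D : List Int) (i : ℕ) : SF D 0 i = 0 := by
  simp [SF]

lemma SF_succ (D : List Int) (M i : ℕ) :
    SF D (M + 1) i = SF D M i + (if (M + 1) ∣ i then tvalF D i (M + 1) else 0) := by
  simp [SF, List.range_succ]
  rw [add_assoc]

lemma SF_trunc (D : List Int) (i M : ℕ) (h1 : 1 ≤ i) (hM : i ≤ M) : SF D M i = SF D i i := by
  induction M with
  | zero => omega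
  | succ M ih =>
    rcases Nat.lt_or_ge i (M + 1) with hlt | hge
    · have hni : ¬ (M + 1) ∣ i := fun hd => by
        have := Nat.le_of_dvd (by omega) hd; omega
      rw [SF_succ, if_neg hni, ih (by omega), add_zero]
    · have : i = M + 1 := by omega
      rw [this]

lemma innerA_spec (n P m wm mm : Int) (hP : P ≠ 0) (hm : 1 ≤ m) (j pwr : Int) (b : List Int)
    (hj : 1 ≤ j) (hnb : n < (b.length : Int)) :
    (buildInnerA n P m wm mm pwr j b).length = b.length ∧
    ∀ i : ℕ, i < b.length →
      (buildInnerA n P m wm mm pwr j b).getD i 0 =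
        if j ≤ (i : Int) ∧ (i : Int) ≤ n ∧ m ∣ ((i : Int) - j)
        then PySem.Int.mod (b.getD i 0 + mm * (pwr * wm ^ (((i : Int) - j) / m).toNat)) P
        else b.getD i 0 := by
  generalize hfuel : (n + 1 - j).toNat = F
  induction F using Nat.strong_induction_on generalizing j pwr b with
  | _ F ih =>
    rw [buildInnerA]
    by_cases hcond : 1 ≤ m ∧ j ≤ n
    · rw [dif_pos hcond]
      have hjlen : j < (b.length : Int) := by omega
      set v := PySem.Int.mod (PySem.List.pyGetD b j 0 + mm * pwr) P with hv
      have hset : PySem.List.pySetD b j v = b.set j.toNat v :=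
        PySem.List.pySetD_of_nonneg _ _ (by omega)
      have hb'len : (PySem.List.pySetD b j v).length = b.length := by
        simp [hset]
      have hb'get : ∀ i : ℕ, i < b.length →
          (PySem.List.pySetD b j v).getD i 0 =
            if (i : Int) = j then PySem.Int.mod (b.getD i 0 + mm * pwr) P else b.getD i 0 := by
        intro i hi
        rw [hset]
        by_cases hij : (i : Int) = j
        · have hjt : j.toNat = i := by omega
          rw [if_pos hij, hjt]
          have hg : PySem.List.pyGetD b j 0 = b.getD j.toNat 0 := by
            rw [PySem.List.pyGetD_eq_getElem b 0 (by omega) hjlen,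
              List.getD_eq_getElem _ _ (by omega)]
          have hvv : v = PySem.Int.mod (b.getD i 0 + mm * pwr) P := by
            rw [hv, hg, hjt]
          rw [← hvv]
          simp [List.getD_eq_getElem?_getD, hi]
        · have hjt : j.toNat ≠ i := by omega
          rw [if_neg hij]
          simp [List.getD_eq_getElem?_getD, List.getElem?_set_ne hjt]
      have hrec := ih ((n + 1 - (j + m)).toNat) (by omega) (j + m)
        (PySem.Int.mod (pwr * wm) P) (PySem.List.pySetD b j v) (by omega)
        (by rw [hb'len]; exact hnb) rfl
      obtain ⟨hlen1, hent1⟩ := hrec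
      refine ⟨by rw [hlen1, hb'len], fun i hi => ?_⟩
      have hi' : i < (PySem.List.pySetD b j v).length := by rw [hb'len]; exact hi
      rw [hent1 i hi', hb'get i hi]
      by_cases hij : (i : Int) = j
      · have hC : j ≤ (i : Int) ∧ (i : Int) ≤ n ∧ m ∣ ((i : Int) - j) :=
          ⟨by omega, by omega, by rw [hij]; simp⟩
        have hnC' : ¬(j + m ≤ (i : Int) ∧ (i : Int) ≤ n ∧ m ∣ ((i : Int) - (j + m))) := by
          rintro ⟨h1, _, _⟩; omega
        rw [if_neg hnC', if_pos hij, if_pos hC]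
        have ht0 : (((i : Int) - j) / m).toNat = 0 := by rw [hij]; simp
        rw [ht0, pow_zero, mul_one]
      · rw [if_neg hij]
        by_cases hC' : j + m ≤ (i : Int) ∧ (i : Int) ≤ n ∧ m ∣ ((i : Int) - (j + m))
        · have hd : m ∣ (i : Int) - j := by
            have h2 := hC'.2.2
            have he : (i : Int) - j = ((i : Int) - (j + m)) + m := by ring
            rw [he]; exact dvd_add h2 (dvd_refl m)
          have hC : j ≤ (i : Int) ∧ (i : Int) ≤ n ∧ m ∣ ((i : Int) - j) :=
            ⟨by omega, hC'.2.1, hd⟩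
          rw [if_pos hC', if_pos hC]
          have hm0 : m ≠ 0 := by omega
          have hdiv : ((i : Int) - j) / m = ((i : Int) - (j + m)) / m + 1 := by
            have he : (i : Int) - j = ((i : Int) - (j + m)) + 1 * m := by ring
            rw [he, Int.add_mul_ediv_right _ _ hm0]
          have hge : (0 : Int) ≤ ((i : Int) - (j + m)) / m := Int.ediv_nonneg (by omega) (by omega)
          have ht : (((i : Int) - j) / m).toNat = (((i : Int) - (j + m)) / m).toNat + 1 := by omega
          rw [ht]
          apply pymod_congr P _ _ hP
          apply Int.ModEq.add_left
          have h1 : Int.ModEq P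
              (PySem.Int.mod (pwr * wm) P * wm ^ (((i : Int) - (j + m)) / m).toNat)
              ((pwr * wm) * wm ^ (((i : Int) - (j + m)) / m).toNat) :=
            (pymod_modEq P _).mul_right _
          refine (h1.mul_left mm).trans ?_
          have he : mm * (pwr * wm * wm ^ (((i : Int) - (j + m)) / m).toNat) =
              mm * (pwr * wm ^ ((((i : Int) - (j + m)) / m).toNat + 1)) := by
            rw [pow_succ]; ring
          rw [he]
        · have hnC : ¬(j ≤ (i : Int) ∧ (i : Int) ≤ n ∧ m ∣ ((i : Int) - j)) := by
            rintro ⟨h1, h2, hd⟩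
            have hle : m ≤ (i : Int) - j := Int.le_of_dvd (by omega) hd
            refine hC' ⟨by omega, h2, ?_⟩
            have he : (i : Int) - (j + m) = ((i : Int) - j) - m := by ring
            rw [he]; exact dvd_sub hd (dvd_refl m)
          rw [if_neg hC', if_neg hnC]
    · rw [dif_neg hcond]
      refine ⟨rfl, fun i hi => ?_⟩
      rw [if_neg]
      rintro ⟨h1, h2, _⟩
      exact hcond ⟨hm, by omega⟩

def stepA (n P : Int) (D : List Int) : List Int → Int → List Int := fun b m =>
  buildInnerA n P m (PySem.Int.mod (PySem.List.pyGetD D m 0) P) (PySem.Int.mod m P)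
    (PySem.Int.mod (PySem.List.pyGetD D m 0) P) m b

lemma build_b_eq (n P : Int) (D : List Int) (size : Int) :
    build_b n P D size =
      (PySem.List.pyRange 1 (n + 1) 1).foldl (stepA n P D) (List.replicate size.toNat 0) := rfl

lemma outerA_spec (n P : Int) (D : List Int) (L : ℕ) (hP : P ≠ 0) (hnL : n < (L : Int))
    (M : ℕ) (hM : (M : Int) ≤ n) :
    ((PySem.List.pyRange 1 ((M : Int) + 1) 1).foldl (stepA n P D) (List.replicate L 0)).length = L ∧
    ∀ i : ℕ, i < L →
      ((PySem.List.pyRange 1 ((M : Int) + 1) 1).foldl (stepA n P D) (List.replicate L 0)).getD i 0 =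
        if 1 ≤ i ∧ (i : Int) ≤ n then PySem.Int.mod (SF D M i) P else 0 := by
  induction M with
  | zero =>
    rw [show ((0 : ℕ) : Int) + 1 = 1 by norm_num, PySem.List.pyRange_one_eq_nil le_rfl]
    refine ⟨by simp, fun i hi => ?_⟩
    rw [SF_zero, pymod_zero]
    simp
  | succ M ih =>
    have ih' := ih (by push_cast at hM ⊢; omega)
    have hsplit : PySem.List.pyRange 1 (((M + 1 : ℕ) : Int) + 1) 1 =
        PySem.List.pyRange 1 ((M : Int) + 1) 1 ++ [(M : Int) + 1] := by
      push_cast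
      exact PySem.List.pyRange_one_succ_right (by omega)
    rw [hsplit, List.foldl_append]
    set resM := (PySem.List.pyRange 1 ((M : Int) + 1) 1).foldl (stepA n P D) (List.replicate L 0)
      with hres
    obtain ⟨ihlen, ihent⟩ := ih'
    have hfold : List.foldl (stepA n P D) resM [(M : Int) + 1] = stepA n P D resM ((M : Int) + 1) := by
      simp
    rw [hfold]
    unfold stepA
    have hinner := innerA_spec n P ((M : Int) + 1)
      (PySem.Int.mod (PySem.List.pyGetD D ((M : Int) + 1) 0) P)
      (PySem.Int.mod ((M : Int) + 1) P) hP (by omega)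
      ((M : Int) + 1) (PySem.Int.mod (PySem.List.pyGetD D ((M : Int) + 1) 0) P) resM
      (by omega) (by rw [ihlen]; omega)
    obtain ⟨hlen1, hent1⟩ := hinner
    refine ⟨by rw [hlen1, ihlen], fun i hi => ?_⟩
    have hi' : i < resM.length := by rw [ihlen]; exact hi
    rw [hent1 i hi', ihent i hi]
    have hD : PySem.List.pyGetD D ((M : Int) + 1) 0 = D.getD (M + 1) 0 := by
      rw [show ((M : Int) + 1) = ((M + 1 : ℕ) : Int) by push_cast; ring,
        PySem.List.pyGetD_natCast]
    by_cases hcase : (M + 1) ∣ i ∧ 1 ≤ i ∧ (i : Int) ≤ n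
    · obtain ⟨⟨q, hq⟩, h1i, hin⟩ := hcase
      have hq1 : 1 ≤ q := by
        rcases Nat.eq_zero_or_pos q with h0 | h0
        · rw [h0, Nat.mul_zero] at hq; omega
        · exact h0
      have hiM : M + 1 ≤ i := Nat.le_of_dvd (by omega) ⟨q, hq⟩
      have hCint : (M : Int) + 1 ≤ (i : Int) ∧ (i : Int) ≤ n ∧
          ((M : Int) + 1) ∣ ((i : Int) - ((M : Int) + 1)) := by
        refine ⟨by push_cast; omega, hin, ?_⟩
        have : (i : Int) - ((M : Int) + 1) = ((M : Int) + 1) * ((q : Int) - 1) := by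
          push_cast [hq]; ring
        rw [this]
        exact ⟨(q : Int) - 1, rfl⟩
      rw [if_pos hCint, if_pos ⟨h1i, hin⟩, if_pos ⟨h1i, hin⟩]
      -- exponent
      have hexp : (((i : Int) - ((M : Int) + 1)) / ((M : Int) + 1)).toNat = q - 1 := by
        have h2 : (i : Int) - ((M : Int) + 1) = ((M : Int) + 1) * ((q : Int) - 1) := by
          push_cast [hq]; ring
        rw [h2, Int.mul_ediv_cancel_left _ (by omega)]
        omega
      rw [hexp]
      have hSF : SF D (M + 1) i = SF D M i + tvalF D i (M + 1) := by
        rw [SF_succ, if_pos ⟨q, hq⟩]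
      rw [hSF]
      apply pymod_congr P _ _ hP
      apply Int.ModEq.add (pymod_modEq P _)
      have hpow : PySem.Int.mod (D.getD (M + 1) 0) P *
          PySem.Int.mod (D.getD (M + 1) 0) P ^ (q - 1) =
          PySem.Int.mod (D.getD (M + 1) 0) P ^ q := by
        rw [← pow_succ']
        congr 1
        omega
      rw [hD, hpow]
      have hdivq : i / (M + 1) = q := by rw [hq]; exact Nat.mul_div_cancel_left q (by omega)
      have htv : tvalF D i (M + 1) = ((M + 1 : ℕ) : Int) * (D.getD (M + 1) 0) ^ q := by
        rw [tvalF, hdivq]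
      rw [htv]
      refine Int.ModEq.mul ?_ ((pymod_modEq P _).pow q)
      have : ((M : Int) + 1) = ((M + 1 : ℕ) : Int) := by push_cast; ring
      rw [this]
      exact pymod_modEq P _
    · have hnC : ¬((M : Int) + 1 ≤ (i : Int) ∧ (i : Int) ≤ n ∧
          ((M : Int) + 1) ∣ ((i : Int) - ((M : Int) + 1))) := by
        rintro ⟨hle, hin, hdv⟩
        have hdvi : ((M : Int) + 1) ∣ (i : Int) := by
          have : (i : Int) = ((i : Int) - ((M : Int) + 1)) + ((M : Int) + 1) := by ring
          rw [this]
          exact dvd_add hdv (dvd_refl _)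
        have : ((M + 1 : ℕ) : Int) ∣ ((i : ℕ) : Int) := by push_cast at hdvi ⊢; exact hdvi
        have hnat : (M + 1) ∣ i := Int.natCast_dvd_natCast.mp this
        exact hcase ⟨hnat, by omega, hin⟩
      rw [if_neg hnC]
      by_cases h1 : 1 ≤ i ∧ (i : Int) ≤ n
      · rw [if_pos h1, if_pos h1]
        have hni : ¬ (M + 1) ∣ i := fun hd => hcase ⟨hd, h1.1, h1.2⟩
        rw [SF_succ, if_neg hni, add_zero]
      · rw [if_neg h1, if_neg h1]

def stepB (P : Int) (D : List Int) (k : Int) : Int → Int → Int := fun acc m =>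
  if PySem.Int.mod k m = 0 then
    PySem.Int.mod
      (acc + PySem.Int.mod m P *
        powmodB (PySem.Int.mod (PySem.List.pyGetD D m 0) P) (PySem.Int.floordiv k m) P)
      P
  else acc

def stepBalt (P : Int) (D : List Int) : List Int → Int → List Int := fun b k =>
  PySem.List.pySetD b k ((PySem.List.pyRange 1 (k + 1) 1).foldl (stepB P D k) 0)

lemma build_b_alt_eq (n P : Int) (D : List Int) (size : Int) :
    build_b_alt n P D size =
      (PySem.List.pyRange 1 (n + 1) 1).foldl (stepBalt P D) (List.replicate size.toNat 0) := rfl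

lemma innerB_spec (P : Int) (D : List Int) (hP : P ≠ 0) (k : ℕ) (hk : 1 ≤ k) (M : ℕ) :
    (PySem.List.pyRange 1 ((M : Int) + 1) 1).foldl (stepB P D (k : Int)) 0 =
      PySem.Int.mod (SF D M k) P := by
  induction M with
  | zero =>
    rw [show ((0 : ℕ) : Int) + 1 = 1 by norm_num, PySem.List.pyRange_one_eq_nil le_rfl,
      SF_zero, pymod_zero]
    rfl
  | succ M ih =>
    have hsplit : PySem.List.pyRange 1 (((M + 1 : ℕ) : Int) + 1) 1 =
        PySem.List.pyRange 1 ((M : Int) + 1) 1 ++ [(M : Int) + 1] := by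
      push_cast
      exact PySem.List.pyRange_one_succ_right (by omega)
    rw [hsplit, List.foldl_append, ih]
    show stepB P D (k : Int) (PySem.Int.mod (SF D M k) P) ((M : Int) + 1) = _
    unfold stepB
    have hcast : ((M : Int) + 1) = ((M + 1 : ℕ) : Int) := by push_cast; ring
    by_cases hdvd : (M + 1) ∣ k
    · have hz : PySem.Int.mod (k : Int) ((M : Int) + 1) = 0 := by
        rw [PySem.Int.mod_eq_zero_iff_dvd, hcast]
        exact Int.natCast_dvd_natCast.mpr hdvd
      rw [if_pos hz]
      set q : ℕ := k / (M + 1) with hqdef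
      have hfd : PySem.Int.floordiv (k : Int) ((M : Int) + 1) = ((q : ℕ) : Int) := by
        rw [hcast]
        exact PySem.Int.floordiv_natCast k (M + 1)
      have hDg : PySem.List.pyGetD D ((M : Int) + 1) 0 = D.getD (M + 1) 0 := by
        rw [hcast, PySem.List.pyGetD_natCast]
      rw [hfd, hDg]
      have hpw := powmodLoop_modEq P hP ((q : ℕ) : Int) (Int.natCast_nonneg _)
        (PySem.Int.mod 1 P) (PySem.Int.mod (D.getD (M + 1) 0) P)
      rw [SF_succ, if_pos hdvd]
      apply pymod_congr P _ _ hP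
      refine Int.ModEq.add (pymod_modEq P _) ?_
      have htn : (((q : ℕ) : Int)).toNat = q := Int.toNat_natCast q
      rw [htn] at hpw
      have hbase : Int.ModEq P
          (PySem.Int.mod 1 P * PySem.Int.mod (D.getD (M + 1) 0) P ^ q)
          (1 * (D.getD (M + 1) 0) ^ q) :=
        Int.ModEq.mul (pymod_modEq P 1) ((pymod_modEq P _).pow _)
      have hmm : Int.ModEq P (PySem.Int.mod ((M : Int) + 1) P) ((M : Int) + 1) := pymod_modEq P _
      simp only [powmodB]
      refine (Int.ModEq.mul hmm (hpw.trans hbase)).trans ?_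
      have heq : ((M : Int) + 1) * (1 * (D.getD (M + 1) 0) ^ q) = tvalF D k (M + 1) := by
        rw [tvalF, ← hqdef]; push_cast; ring
      rw [heq]
    · have hz : ¬ PySem.Int.mod (k : Int) ((M : Int) + 1) = 0 := by
        rw [PySem.Int.mod_eq_zero_iff_dvd, hcast]
        exact fun hd => hdvd (Int.natCast_dvd_natCast.mp hd)
      rw [if_neg hz, SF_succ, if_neg hdvd, add_zero]

lemma outerB_spec (n P : Int) (D : List Int) (L : ℕ) (hP : P ≠ 0) (hnL : n < (L : Int))
    (K : ℕ) (hK : (K : Int) ≤ n) :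
    ((PySem.List.pyRange 1 ((K : Int) + 1) 1).foldl (stepBalt P D) (List.replicate L 0)).length = L ∧
    ∀ i : ℕ, i < L →
      ((PySem.List.pyRange 1 ((K : Int) + 1) 1).foldl (stepBalt P D) (List.replicate L 0)).getD i 0 =
        if 1 ≤ i ∧ i ≤ K then PySem.Int.mod (SF D i i) P else 0 := by
  induction K with
  | zero =>
    rw [show ((0 : ℕ) : Int) + 1 = 1 by norm_num, PySem.List.pyRange_one_eq_nil le_rfl]
    refine ⟨by simp, fun i hi => ?_⟩
    have : ¬(1 ≤ i ∧ i ≤ 0) := by omega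
    rw [if_neg this]
    simp
  | succ K ih =>
    obtain ⟨ihlen, ihent⟩ := ih (by push_cast at hK ⊢; omega)
    have hsplit : PySem.List.pyRange 1 (((K + 1 : ℕ) : Int) + 1) 1 =
        PySem.List.pyRange 1 ((K : Int) + 1) 1 ++ [(K : Int) + 1] := by
      push_cast
      exact PySem.List.pyRange_one_succ_right (by omega)
    rw [hsplit, List.foldl_append]
    set resK := (PySem.List.pyRange 1 ((K : Int) + 1) 1).foldl (stepBalt P D) (List.replicate L 0)
      with hres
    rw [List.foldl_cons, List.foldl_nil]
    have hcast : ((K : Int) + 1) = ((K + 1 : ℕ) : Int) := by push_cast; ring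
    have hw : (PySem.List.pyRange 1 (((K : Int) + 1) + 1) 1).foldl (stepB P D ((K : Int) + 1)) 0 =
        PySem.Int.mod (SF D (K + 1) (K + 1)) P := by
      rw [hcast]
      exact innerB_spec P D hP (K + 1) (by omega) (K + 1)
    have hstep : stepBalt P D resK ((K : Int) + 1) =
        PySem.List.pySetD resK ((K : Int) + 1) (PySem.Int.mod (SF D (K + 1) (K + 1)) P) := by
      rw [stepBalt]
      rw [hw]
    rw [hstep]
    have hset : PySem.List.pySetD resK ((K : Int) + 1) (PySem.Int.mod (SF D (K + 1) (K + 1)) P) =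
        resK.set (K + 1) (PySem.Int.mod (SF D (K + 1) (K + 1)) P) := by
      rw [PySem.List.pySetD_of_nonneg _ _ (by omega),
        show ((K : Int) + 1).toNat = K + 1 by omega]
    rw [hset]
    refine ⟨by simp [ihlen], fun i hi => ?_⟩
    by_cases hik : i = K + 1
    · have hlt : K + 1 < resK.length := by rw [ihlen]; omega
      rw [if_pos (show 1 ≤ i ∧ i ≤ K + 1 by omega), hik]
      simp [List.getD_eq_getElem?_getD, hlt]
    · rw [show (resK.set (K + 1) (PySem.Int.mod (SF D (K + 1) (K + 1)) P)).getD i 0 = resK.getD i 0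
        by simp [List.getD_eq_getElem?_getD, List.getElem?_set_ne (Ne.symm hik)]]
      rw [ihent i hi]
      by_cases h1 : 1 ≤ i ∧ i ≤ K
      · rw [if_pos h1, if_pos ⟨h1.1, by omega⟩]
      · rw [if_neg h1, if_neg (by omega)]

-- ===== VERDICT (by name: the statement is the Claim_ definition above) =====
theorem build_b_spec : Claim_equal_build_b := by
  intro n P D size _hdom hpre
  unfold Pre_build_b at hpre
  unfold Spec_build_b
  by_cases hn : 1 ≤ n
  · obtain ⟨hP, hD, hs⟩ := hpre hn
    rw [build_b_eq, build_b_alt_eq]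
    have hnL : n < ((size.toNat : ℕ) : Int) := by omega
    obtain ⟨hAlen, hAent⟩ := outerA_spec n P D size.toNat hP hnL n.toNat (by omega)
    obtain ⟨hBlen, hBent⟩ := outerB_spec n P D size.toNat hP hnL n.toNat (by omega)
    rw [show n + 1 = ((n.toNat : ℕ) : Int) + 1 by omega]
    apply List.ext_getElem
    · rw [hAlen, hBlen]
    · intro i h1 h2
      have hiL : i < size.toNat := hAlen ▸ h1
      rw [← List.getD_eq_getElem _ 0 h1, ← List.getD_eq_getElem _ 0 h2,
        hAent i hiL, hBent i hiL]
      by_cases hc : 1 ≤ i ∧ (i : Int) ≤ n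
      · rw [if_pos hc, if_pos ⟨hc.1, by omega⟩, SF_trunc D i n.toNat hc.1 (by omega)]
      · rw [if_neg hc, if_neg (by omega)]
  · rw [build_b_eq, build_b_alt_eq, PySem.List.pyRange_one_eq_nil (by omega)]
    rfl
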